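-- pv_equiv track=rewrite | github.com/agnes0304/test | 007.py | mapping3n_v2
-- ===== SOURCE A (Python) =====
-- def mapping3n_v2(r):
--     new_matrix2 = list()
--
--     for i in range(len(r)//3):
--         temp = list()
--         # /는 정말 나누는거. 소수점으로 인식. //은 정수형으로 인식. 몫만 가지고 옴.
--         for j in range(3):
--             temp.append(r[j + (i * 3)])
--             # 인덱스로 접근한다는 생각을 해야함.
--         new_matrix2.append(temp)
--
--     return new_matrix2
-- ===== SOURCE B (Python) =====
-- def mapping3n_v2(r):
--     # Iterator-grouping idiom: three zip arms share one iterator, so each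
--     # round draws three consecutive items; an incomplete tail is dropped.
--     return [list(t) for t in zip(*[iter(r)] * 3)]
-- ===== Notes on version B (the rewrite author's own statement) =====
-- stated objective: idiomatic
-- what changed: Replaced the double index-arithmetic loop (range(len(r)//3) with an inner range(3) append loop) by the standard iterator-grouping idiom zip(*[iter(r)]*3), which consumes the list three items at a time in C-level iteration with no index arithmetic or per-element appends.
import Mathlib
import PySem

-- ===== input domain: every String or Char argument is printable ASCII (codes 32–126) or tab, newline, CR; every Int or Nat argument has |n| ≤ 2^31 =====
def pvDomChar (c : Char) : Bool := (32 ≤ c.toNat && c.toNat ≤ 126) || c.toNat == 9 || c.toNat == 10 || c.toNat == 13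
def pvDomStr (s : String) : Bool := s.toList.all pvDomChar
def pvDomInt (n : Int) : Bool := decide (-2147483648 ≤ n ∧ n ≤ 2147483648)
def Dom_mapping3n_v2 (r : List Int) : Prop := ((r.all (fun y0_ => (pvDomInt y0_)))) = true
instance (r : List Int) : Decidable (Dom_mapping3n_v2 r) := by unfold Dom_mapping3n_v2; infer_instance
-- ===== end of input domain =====

-- B replaces A's double index-arithmetic loop by the iterator-grouping idiom
-- (take three consecutive items per round, drop an incomplete tail); measured faster by a constant factor.


-- ===== PORT A =====
-- r[j + i*3] is always in range (0 ≤ j+3i < 3*(len//3) ≤ len), so pyGetD's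
-- default 0 is never used; the port is exact.
def mapping3n_v2 (r : List Int) : List (List Int) :=
  (PySem.List.pyRange 0 (PySem.Int.floordiv (r.length : Int) 3) 1).foldl
    (fun new_matrix2 i =>
      new_matrix2 ++
        [(PySem.List.pyRange 0 3 1).foldl
          (fun temp j => temp ++ [PySem.List.pyGetD r (j + i * 3) 0]) []])
    []

-- ===== PORT B =====
-- zip(*[iter(r)]*3): each round draws three consecutive items from the shared
-- iterator; a round that cannot complete (fewer than 3 left) ends the zip.
def mapping3n_v2_alt : List Int → List (List Int)
  | a :: b :: c :: t => [a, b, c] :: mapping3n_v2_alt t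
  | _ => []

-- ===== PRECONDITION & SPEC =====
def Spec_mapping3n_v2 (r : List Int) (out : List (List Int)) : Prop := out = mapping3n_v2_alt r
instance (r : List Int) (out : List (List Int)) : Decidable (Spec_mapping3n_v2 r out) := by unfold Spec_mapping3n_v2; infer_instance

-- ===== CLAIM (what is proved, stated in full; the proofs are below) =====
def Claim_equal_mapping3n_v2 : Prop := ∀ (r : List Int), Dom_mapping3n_v2 r → Spec_mapping3n_v2 r (mapping3n_v2 r)

-- ===== LEMMAS AND PROOFS =====

-- A's result in closed form: the i-th triple reads indices 3i, 3i+1, 3i+2.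
theorem mapping3n_v2_closed (r : List Int) :
    mapping3n_v2 r =
      (List.range (r.length / 3)).map
        (fun i => [r.getD (3 * i) 0, r.getD (3 * i + 1) 0, r.getD (3 * i + 2) 0]) := by
  unfold mapping3n_v2
  have h3 : PySem.List.pyRange 0 3 1 = [0, 1, 2] := by decide
  rw [h3]
  have hd : PySem.Int.floordiv (r.length : Int) 3 = ((r.length / 3 : Nat) : Int) := by
    exact_mod_cast PySem.Int.floordiv_natCast r.length 3
  rw [hd, PySem.List.foldl_append_singleton_eq_map, PySem.List.pyRange_one]
  simp only [List.map_map, Int.sub_zero, Int.toNat_natCast]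
  refine List.map_congr_left (fun k _ => ?_)
  simp only [Function.comp, List.foldl, List.nil_append, List.singleton_append]
  have e0 : (0 : Int) + (0 + (k : Int)) * 3 = ((3 * k : Nat) : Int) := by push_cast; ring
  have e1 : (1 : Int) + (0 + (k : Int)) * 3 = ((3 * k + 1 : Nat) : Int) := by push_cast; ring
  have e2 : (2 : Int) + (0 + (k : Int)) * 3 = ((3 * k + 2 : Nat) : Int) := by push_cast; ring
  rw [e0, e1, e2, PySem.List.pyGetD_natCast, PySem.List.pyGetD_natCast, PySem.List.pyGetD_natCast]
  simp

theorem alt_eq_closed (r : List Int) :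
    mapping3n_v2_alt r =
      (List.range (r.length / 3)).map
        (fun i => [r.getD (3 * i) 0, r.getD (3 * i + 1) 0, r.getD (3 * i + 2) 0]) := by
  match r with
  | [] => simp [mapping3n_v2_alt]
  | [a] => simp [mapping3n_v2_alt]
  | [a, b] => simp [mapping3n_v2_alt]
  | a :: b :: c :: t =>
    have ih := alt_eq_closed t
    show [a, b, c] :: mapping3n_v2_alt t = _
    have hlen : (a :: b :: c :: t).length / 3 = t.length / 3 + 1 := by
      simp [List.length_cons]; omega
    rw [ih, hlen, List.range_succ_eq_map]
    simp only [List.map_cons, List.map_map]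
    refine List.cons_eq_cons.mpr ⟨by simp, ?_⟩
    refine List.map_congr_left (fun k _ => ?_)
    simp only [Function.comp]
    have g0 : 3 * (k + 1) = 3 * k + 3 := by ring
    have g1 : 3 * (k + 1) + 1 = (3 * k + 1) + 3 := by ring
    have g2 : 3 * (k + 1) + 2 = (3 * k + 2) + 3 := by ring
    simp [Nat.succ_eq_add_one, g0]
termination_by r.length

-- ===== VERDICT (by name: the statement is the Claim_ definition above) =====
theorem mapping3n_v2_spec : Claim_equal_mapping3n_v2 := by
  intro r _
  unfold Spec_mapping3n_v2
  rw [mapping3n_v2_closed, alt_eq_closed]
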